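-- pv_equiv track=rewrite | github.com/hrvojebusic/Tweet-sentiment-analysis | src/run2.py | emphasize_punctuation
-- ===== SOURCE A (Python) =====
-- def emphasize_punctuation(words):
--     special_chars = ['!', '?']
--     i = 1
--
--     while (i<len(words)):
--         word1 = words[i-1]
--         word2 = words[i]
--         if (word1 in special_chars and word2 in special_chars):
--             start = i-1
--             while (i+1<len(words) and words[i+1] in special_chars):
--                 i += 1
--             words = words[:start] + ['<<emphasis>>'] + words[i+1:]
--             i = start
--
--         i += 1
--
--     return words
-- ===== SOURCE B (Python) =====
-- def emphasize_punctuation(words):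
--     out = []
--     pending = []
--     for w in words:
--         if w == '!' or w == '?':
--             pending.append(w)
--         else:
--             out.append('<<emphasis>>') if len(pending) >= 2 else out.extend(pending)
--             pending = []
--             out.append(w)
--     out.append('<<emphasis>>') if len(pending) >= 2 else out.extend(pending)
--     return out
-- ===== Notes on version B (the rewrite author's own statement) =====
-- stated objective: simpler
-- what changed: Replaces A's index/while loop that repeatedly re-slices and rebuilds the list in place with a single left-to-right pass that buffers the current run of '!'/'?' and flushes it as '<<emphasis>>' (run>=2) or unchanged (run of 1).
import Mathlib
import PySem

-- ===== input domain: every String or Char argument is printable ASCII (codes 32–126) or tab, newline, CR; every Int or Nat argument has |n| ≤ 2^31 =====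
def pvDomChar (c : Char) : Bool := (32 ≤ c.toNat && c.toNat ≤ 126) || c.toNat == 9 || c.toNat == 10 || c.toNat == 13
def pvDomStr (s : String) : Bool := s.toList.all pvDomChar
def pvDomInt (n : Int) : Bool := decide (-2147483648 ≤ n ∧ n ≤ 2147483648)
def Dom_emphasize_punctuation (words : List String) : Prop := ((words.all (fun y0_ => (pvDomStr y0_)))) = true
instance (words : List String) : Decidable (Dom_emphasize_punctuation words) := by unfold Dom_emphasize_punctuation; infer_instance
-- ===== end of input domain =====

-- B collapses each maximal run of '!'/'?' in one buffered left-to-right pass instead of A's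
-- index/while re-slicing loop; objective: simpler (same return value everywhere).

-- ===== PORT A =====

-- helper for Python's in-range indexing words[k] (the loop only reads valid indices)
def getS (ws : List String) (k : Nat) : String := (ws[k]?).getD ""

def pvSpecialA : List String := ["!", "?"]

-- inner while loop: advances i while words[i+1] is a special char
def advA (words : List String) (i : Nat) : Nat :=
  if h : i + 1 < words.length ∧ pvSpecialA.contains (getS words (i + 1)) = true then
    advA words (i + 1)
  else i
termination_by words.length - i

theorem advA_ge (words : List String) (i : Nat) : i ≤ advA words i := by
  fun_induction advA words i with
  | case1 i h ih => omega
  | case2 => omega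

theorem advA_lt (words : List String) (i : Nat) (h : i < words.length) :
    advA words i < words.length := by
  fun_induction advA words i with
  | case1 i h' ih => exact ih (by omega)
  | case2 => exact h

-- outer while loop of A
def loopA (words : List String) (i : Nat) : List String :=
  if h : i < words.length then
    let word1 := getS words (i - 1)
    let word2 := getS words i
    if pvSpecialA.contains word1 = true ∧ pvSpecialA.contains word2 = true then
      let start := i - 1
      let j := advA words i
      loopA (words.take start ++ ["<<emphasis>>"] ++ words.drop (j + 1)) (start + 1)
    else
      loopA words (i + 1)
  else words
termination_by words.length - i
decreasing_by
  · have hj1 := advA_ge words i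
    have hj2 := advA_lt words i h
    simp only [List.length_append, List.length_take, List.length_drop, List.length_cons,
      List.length_nil]
    omega
  · omega

def emphasize_punctuation (words : List String) : List String := loopA words 1

-- ===== PORT B =====

def isSpecB (w : String) : Bool := w == "!" || w == "?"

-- flush the buffered run of special chars onto the output
def flushB (out pending : List String) : List String :=
  if 2 ≤ pending.length then out ++ ["<<emphasis>>"] else out ++ pending

def goB (out pending ws : List String) : List String :=
  match ws with
  | [] => flushB out pending
  | w :: rest =>
      if isSpecB w then goB out (pending ++ [w]) rest
      else goB (flushB out pending ++ [w]) [] rest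

def emphasize_punctuation_alt (words : List String) : List String := goB [] [] words

-- ===== PRECONDITION & SPEC =====
def Spec_emphasize_punctuation (words : List String) (out : List String) : Prop := out = emphasize_punctuation_alt words
instance (words : List String) (out : List String) : Decidable (Spec_emphasize_punctuation words out) := by unfold Spec_emphasize_punctuation; infer_instance

-- ===== CLAIM (what is proved, stated in full; the proofs are below) =====
def Claim_equal_emphasize_punctuation : Prop := ∀ (words : List String), Dom_emphasize_punctuation words → Spec_emphasize_punctuation words (emphasize_punctuation words)

-- ===== LEMMAS AND PROOFS =====

theorem contains_eq_isSpec (w : String) : pvSpecialA.contains w = isSpecB w := by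
  simp only [pvSpecialA, isSpecB, List.contains_cons, List.contains_nil, Bool.or_false]

-- the inner while loop only visits special positions and stops at a non-special one
theorem advA_mid (words : List String) (i : Nat) :
    ∀ k, i < k → k ≤ advA words i → isSpecB (getS words k) = true := by
  fun_induction advA words i with
  | case1 i h ih =>
    intro k hk1 hk2
    rcases Nat.lt_or_ge (i + 1) k with h' | h'
    · exact ih k h' hk2
    · have : k = i + 1 := by omega
      subst this
      rw [← contains_eq_isSpec]; exact h.2
  | case2 i h =>
    intro k hk1 hk2; omega

theorem advA_stop (words : List String) (i : Nat) :
    ¬ (advA words i + 1 < words.length ∧ isSpecB (getS words (advA words i + 1)) = true) := by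
  fun_induction advA words i with
  | case1 i h ih => exact ih
  | case2 i h => rw [← contains_eq_isSpec]; exact h

-- all-special prefixes are buffered
theorem goB_accum (run : List String) : ∀ out pending s,
    (∀ r ∈ run, isSpecB r = true) →
    goB out pending (run ++ s) = goB out (pending ++ run) s := by
  induction run with
  | nil => intro out pending s _; simp
  | cons r rest ih =>
    intro out pending s hall
    simp only [List.cons_append, goB, hall r (by simp), if_true]
    rw [ih out (pending ++ [r]) s (fun x hx => hall x (by simp [hx]))]
    simp

def HeadOk (s : List String) : Prop := s = [] ∨ isSpecB (s.headD "") = false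

-- collapsing a maximal special run of length ≥ 2, base case (empty prefix)
theorem goB_run (run : List String) (s : List String) (out : List String)
    (hlen : 2 ≤ run.length) (hall : ∀ r ∈ run, isSpecB r = true) (hs : HeadOk s) :
    goB out [] (run ++ s) = goB out [] ("<<emphasis>>" :: s) := by
  rw [goB_accum run out [] s hall]
  simp only [List.nil_append]
  cases s with
  | nil => simp [goB, flushB, hlen]
  | cons w s' =>
    rcases hs with h | h
    · simp at h
    · simp only [List.headD] at h
      simp [goB, h, flushB, hlen]

def EndsOk (p : List String) : Prop := p = [] ∨ isSpecB (p.getLastD "") = false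

theorem goB_collapse (p : List String) : ∀ out pending run s,
    EndsOk p → (p = [] → pending = []) →
    2 ≤ run.length → (∀ r ∈ run, isSpecB r = true) → HeadOk s →
    goB out pending (p ++ (run ++ s)) = goB out pending (p ++ ("<<emphasis>>" :: s)) := by
  induction p with
  | nil =>
    intro out pending run s _ hpend hlen hall hs
    have hpe := hpend rfl
    subst hpe
    simpa using goB_run run s out hlen hall hs
  | cons x p' ih =>
    intro out pending run s hend hpend hlen hall hs
    have hend' : EndsOk p' ∧ (p' = [] → isSpecB x = false) := by
      rcases hend with h | h
      · simp at h
      · cases p' with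
        | nil => exact ⟨Or.inl rfl, fun _ => by simpa using h⟩
        | cons y t =>
          refine ⟨Or.inr ?_, fun h' => by simp at h'⟩
          simpa using h
    simp only [List.cons_append, goB]
    split
    · rename_i hx
      have hp' : p' ≠ [] := by
        intro h; have := hend'.2 h; rw [hx] at this; simp at this
      exact ih out (pending ++ [x]) run s hend'.1 (fun h => absurd h hp') hlen hall hs
    · exact ih _ [] run s hend'.1 (fun _ => rfl) hlen hall hs

-- lists with no two adjacent special tokens are fixed points of B
def NoAdjL : List String → Prop
  | [] => True
  | [_] => True
  | x :: y :: rest => ¬ (isSpecB x = true ∧ isSpecB y = true) ∧ NoAdjL (y :: rest)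

theorem goB_noadj (ws : List String) : NoAdjL ws → ∀ out,
    (goB out [] ws = out ++ ws) ∧
    (∀ c, (ws = [] ∨ isSpecB (ws.headD "") = false) → goB out [c] ws = out ++ c :: ws) := by
  induction ws with
  | nil =>
    intro _ out
    refine ⟨by simp [goB, flushB], fun c _ => by simp [goB, flushB]⟩
  | cons w rest ih =>
    intro hna out
    have hrest : NoAdjL rest := by
      cases rest with
      | nil => trivial
      | cons y t => exact hna.2
    have hpair : rest = [] ∨ ¬ (isSpecB w = true ∧ isSpecB (rest.headD "") = true) := by
      cases rest with
      | nil => exact Or.inl rfl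
      | cons y t => exact Or.inr (by simpa using hna.1)
    constructor
    · simp only [goB]
      split
      · rename_i hw
        have hr : rest = [] ∨ isSpecB (rest.headD "") = false := by
          rcases hpair with h | h
          · exact Or.inl h
          · right
            by_contra hc
            exact h ⟨hw, by simpa using hc⟩
        simp only [List.nil_append]
        rw [(ih hrest out).2 w hr]
      · rw [(ih hrest _).1]; simp [flushB]
    · intro c hc
      rcases hc with h | h
      · simp at h
      · simp only [List.headD] at h
        simp only [goB, h, Bool.false_eq_true, if_false]
        rw [(ih hrest _).1]
        simp [flushB]
  
-- indexed no-adjacent condition implies the structural one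
theorem noAdj_of_idx (ws : List String) :
    (∀ j, 1 ≤ j → j < ws.length → ¬ (isSpecB (getS ws (j - 1)) = true ∧ isSpecB (getS ws j) = true)) →
    NoAdjL ws := by
  induction ws with
  | nil => intro _; trivial
  | cons x rest ih =>
    intro h
    cases rest with
    | nil => trivial
    | cons y t =>
      refine ⟨?_, ih ?_⟩
      · have := h 1 (by omega) (by simp)
        simpa [getS] using this
      · intro j hj hjl
        have := h (j + 1) (by omega) (by simpa using Nat.succ_lt_succ hjl)
        have e1 : getS (x :: y :: t) (j + 1 - 1) = getS (y :: t) (j - 1) := by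
          have : j + 1 - 1 = (j - 1) + 1 := by omega
          rw [this]; simp [getS]
        have e2 : getS (x :: y :: t) (j + 1) = getS (y :: t) j := by simp [getS]
        rw [e1, e2] at this
        exact this

def NoAdjBelow (words : List String) (i : Nat) : Prop :=
  ∀ j, 1 ≤ j → j < i → ¬ (isSpecB (getS words (j - 1)) = true ∧ isSpecB (getS words j) = true)

-- main invariant: while positions below i carry no adjacent special pair, loopA computes B
theorem loopA_eq (n : Nat) : ∀ (words : List String) (i : Nat),
    words.length - i ≤ n → 1 ≤ i → NoAdjBelow words i →
    loopA words i = emphasize_punctuation_alt words := by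
  induction n with
  | zero =>
    intro words i hn hi hna
    have hil : words.length ≤ i := by omega
    rw [loopA, dif_neg (by omega)]
    have : NoAdjL words := noAdj_of_idx words (fun j hj hjl => hna j hj (by omega))
    have := (goB_noadj words this []).1
    simp only [List.nil_append] at this
    simp [emphasize_punctuation_alt, this]
  | succ m ih =>
    intro words i hn hi hna
    by_cases hil : i < words.length
    · rw [loopA, dif_pos hil]
      simp only []
      by_cases hsp : pvSpecialA.contains (getS words (i - 1)) = true ∧ pvSpecialA.contains (getS words i) = true
      · rw [if_pos hsp]
        set j := advA words i with hjdef
        have hj1 : i ≤ j := advA_ge words i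
        have hj2 : j < words.length := advA_lt words i hil
        set start := i - 1 with hstart
        set p := words.take start with hp
        set run := (words.drop start).take (j + 1 - start) with hrun
        set s := words.drop (j + 1) with hs
        have hruns : run ++ s = words.drop start := by
          have hdd : s = (words.drop start).drop (j + 1 - start) := by
            rw [hs, List.drop_drop]
            congr 1
            omega
          rw [hrun, hdd]
          exact List.take_append_drop _ _
        have hsplit : words = p ++ (run ++ s) := by
          rw [hp, hruns]
          exact (List.take_append_drop start words).symm
        have hrunlen : run.length = j + 1 - start := by
          rw [hrun]
          simp only [List.length_take, List.length_drop]
          omega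
        have hrunget : ∀ m, (hm : m < run.length) → run[m] = getS words (start + m) := by
          intro m hm
          have hm' : start + m < words.length := by
            rw [hrunlen] at hm; omega
          simp only [hrun, List.getElem_take, List.getElem_drop]
          simp [getS, List.getElem?_eq_getElem hm']
        have hallspec : ∀ k, start ≤ k → k ≤ j → isSpecB (getS words k) = true := by
          intro k h1 h2
          rcases Nat.lt_or_ge k (i + 1) with h' | h'
          · rcases Nat.lt_or_ge k i with h'' | h''
            · have : k = start := by omega
              subst this
              rw [← contains_eq_isSpec]; exact hsp.1
            · have : k = i := by omega
              subst this
              rw [← contains_eq_isSpec]; exact hsp.2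
          · exact advA_mid words i k (by omega) h2
        have hallrun : ∀ r ∈ run, isSpecB r = true := by
          intro r hr
          obtain ⟨m, hm, rfl⟩ := List.mem_iff_getElem.mp hr
          rw [hrunget m hm]
          exact hallspec (start + m) (by omega) (by rw [hrunlen] at hm; omega)
        have hlen2 : 2 ≤ run.length := by rw [hrunlen]; omega
        have hends : EndsOk p := by
          rcases Nat.eq_zero_or_pos start with h0 | h0
          · left; rw [hp, h0]; simp
          · right
            have hplen : p.length = start := by
              rw [hp]; simp; omega
            have hget : p.getLastD "" = getS words (start - 1) := by
              rw [List.getLastD_eq_getLast?, List.getLast?_eq_getElem?]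
              rw [hplen]
              rw [hp]
              rw [List.getElem?_take_of_lt (by omega)]
              rfl
            rw [hget]
            have := hna start h0 (by omega)
            have hsp1 : isSpecB (getS words start) = true := by
              have : start = i - 1 := hstart
              rw [this, ← contains_eq_isSpec]; exact hsp.1
            by_contra hc
            exact hna start h0 (by omega) ⟨by simpa using hc, hsp1⟩
        have hhead : HeadOk s := by
          rcases Nat.lt_or_ge (j + 1) words.length with h' | h'
          · right
            have : s.headD "" = getS words (j + 1) := by
              rw [hs]
              simp only [getS]
              rw [List.headD_eq_head?, List.head?_eq_getElem?, List.getElem?_drop]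
            rw [this]
            have := advA_stop words i
            rw [← hjdef] at this
            by_contra hc
            exact this ⟨h', by simpa using hc⟩
          · left; rw [hs]; simp [List.drop_eq_nil_of_le h']
        have hwords' : words.take start ++ ["<<emphasis>>"] ++ words.drop (j + 1)
            = p ++ ("<<emphasis>>" :: s) := by
          rw [hp, hs, List.append_assoc]; rfl
        rw [hwords']
        -- new state satisfies the invariant
        have hplen : p.length = start := by rw [hp]; simp; omega
        have hna' : NoAdjBelow (p ++ ("<<emphasis>>" :: s)) (start + 1) := by
          intro k hk1 hk2
          have hk3 : k ≤ start := by omega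
          have hgetlt : ∀ m, m < start → getS (p ++ ("<<emphasis>>" :: s)) m = getS words m := by
            intro m hm
            simp only [getS]
            rw [List.getElem?_append_left (by omega), hp, List.getElem?_take_of_lt hm]
          rcases Nat.lt_or_ge k start with hk | hk
          · rw [hgetlt (k - 1) (by omega), hgetlt k hk]
            exact hna k hk1 (by omega)
          · have : k = start := by omega
            subst this
            have : getS (p ++ ("<<emphasis>>" :: s)) start = "<<emphasis>>" := by
              simp only [getS]
              rw [List.getElem?_append_right (by omega), hplen]
              simp
            rw [this]
            intro hcon
            simp [isSpecB] at hcon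
        have hlen' : (p ++ ("<<emphasis>>" :: s)).length - (start + 1) ≤ m := by
          simp only [List.length_append, List.length_cons, hplen]
          rw [hs]
          simp only [List.length_drop]
          omega
        rw [ih (p ++ ("<<emphasis>>" :: s)) (start + 1) hlen' (by omega) hna']
        -- both sides are B of equal lists
        conv_rhs => rw [hsplit]
        simp only [emphasize_punctuation_alt]
        exact (goB_collapse p [] [] run s hends (fun _ => rfl) hlen2 hallrun hhead).symm
      · rw [if_neg hsp]
        apply ih words (i + 1) (by omega) (by omega)
        intro k hk1 hk2
        rcases Nat.lt_or_ge k i with hk | hk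
        · exact hna k hk1 hk
        · have : k = i := by omega
          subst this
          intro hcon
          rw [← contains_eq_isSpec, ← contains_eq_isSpec] at hcon
          exact hsp hcon
    · rw [loopA, dif_neg hil]
      have : NoAdjL words := noAdj_of_idx words (fun j hj hjl => hna j hj (by omega))
      have := (goB_noadj words this []).1
      simp only [List.nil_append] at this
      simp [emphasize_punctuation_alt, this]

-- ===== VERDICT (by name: the statement is the Claim_ definition above) =====
theorem emphasize_punctuation_spec : Claim_equal_emphasize_punctuation := by
  intro words _
  unfold Spec_emphasize_punctuation emphasize_punctuation
  exact loopA_eq words.length words 1 (by omega) (by omega) (by intro j hj hjl; omega)
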